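-- pv_equiv track=rewrite | github.com/ricardoianelli/python_test | storm.py | filter_facts
-- ===== SOURCE A (Python) =====
-- def get_names(facts):
--     names = []
--     for fact in facts:
--         if not (fact[0] in names):
--             names.append(fact[0])
--     return names
--
-- def filter_by_entity(facts, entity):
--     return [fact for fact in facts if fact[0] == entity]
--
-- def filter_by_attribute(facts, attribute):
--     return [fact for fact in facts if fact[1] == attribute[0]]
--
-- def filter_by_active(facts):
--     filtered_facts = []
--     for fact in facts:
--         if fact[3]:
--             filtered_facts.append(fact)
--         else:
--             previousFact = (fact[0], fact[1], fact[2], True)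
--             if previousFact in filtered_facts:
--                 filtered_facts.remove(previousFact)
--     return filtered_facts
--
-- def filter_facts(facts, schema):
--     facts = filter_by_active(facts)
--     names = get_names(facts)
--     current_facts = []
--     for entity in names:
--         filtered_by_entity = filter_by_entity(facts, entity)
--         fully_filtered = []
--         for attr in schema:
--             filtered_by_attr = filter_by_attribute(filtered_by_entity, attr)
--             if attr[2] == 'one' and len(filtered_by_attr) > 0:
--                 filtered_by_attr = [filtered_by_attr[-1]]
--             fully_filtered = fully_filtered + filtered_by_attr
--
--         current_facts = current_facts + fully_filtered
--     current_facts.sort()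
--     return current_facts
-- ===== SOURCE B (Python) =====
-- def filter_facts(facts, schema):
--     # surviving count per (entity, attribute, value): retractions cancel
--     # earlier still-standing assertions of the same triple
--     c = {}
--     for e, a, v, act in facts:
--         k = (e, a, v)
--         if act:
--             c[k] = c.get(k, 0) + 1
--         elif c.get(k, 0) > 0:
--             c[k] = c[k] - 1
--     # last surviving fact per (entity, attribute) group
--     last = {}
--     for e, a, v, act in facts:
--         if act and c.get((e, a, v), 0) > 0:
--             last[(e, a)] = (e, a, v, True)
--     out = []
--     for (e, a, v), n in c.items():
--         if n > 0:
--             for name, _, mode in schema: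
--                 if name == a:
--                     if mode == 'one':
--                         if last.get((e, a)) == (e, a, v, True):
--                             out.append((e, a, v, True))
--                     else:
--                         out.extend([(e, a, v, True)] * n)
--     out.sort()
--     return out
-- ===== Notes on version B (the rewrite author's own statement) =====
-- stated objective: faster
-- what changed: A's quadratic retraction handling (list.remove scans inside a loop) and its names x schema x facts repeated-filter passes are replaced by three dictionary passes: a per-(entity,attribute,value) surviving-count dict, a last-surviving-fact-per-(entity,attribute) dict built by overwriting, and one emission loop over the count dict; a final sort makes the output order identical.
import Mathlib
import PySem

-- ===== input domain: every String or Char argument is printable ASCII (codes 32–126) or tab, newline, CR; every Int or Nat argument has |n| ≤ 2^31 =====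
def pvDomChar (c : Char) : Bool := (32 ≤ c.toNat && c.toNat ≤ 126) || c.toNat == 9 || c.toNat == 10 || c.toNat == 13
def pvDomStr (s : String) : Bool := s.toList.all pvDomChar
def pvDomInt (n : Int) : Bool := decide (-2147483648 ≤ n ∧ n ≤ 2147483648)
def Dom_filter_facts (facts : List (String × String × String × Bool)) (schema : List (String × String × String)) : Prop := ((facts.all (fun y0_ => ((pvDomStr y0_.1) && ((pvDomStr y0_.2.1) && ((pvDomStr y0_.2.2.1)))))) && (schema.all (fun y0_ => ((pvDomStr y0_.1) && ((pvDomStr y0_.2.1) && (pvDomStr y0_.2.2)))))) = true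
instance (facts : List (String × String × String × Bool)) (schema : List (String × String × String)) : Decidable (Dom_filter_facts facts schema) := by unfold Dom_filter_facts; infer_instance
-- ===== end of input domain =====

-- B replaces A's quadratic retraction handling (list.remove inside a loop) and its
-- names × schema double filtering pass by two counting/last-overwrite dictionary passes;
-- objective: faster (hash-dict passes instead of repeated list scans).

-- ===== PORT A =====
-- Python's list.sort() on these 4-tuples is lexicographic; we sort by the
-- injective lexicographic key below (PySem.List.sorted, stable).
def pvKey (f : String × String × String × Bool) : Lex (String × Lex (String × Lex (String × Bool))) :=
  toLex (f.1, toLex (f.2.1, toLex (f.2.2.1, f.2.2.2)))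

def pvGetNames (facts : List (String × String × String × Bool)) : List String :=
  facts.foldl (fun names fact => if ¬ (fact.1 ∈ names) then names ++ [fact.1] else names) []

def pvFilterByEntity (facts : List (String × String × String × Bool)) (entity : String) :
    List (String × String × String × Bool) :=
  facts.filter (fun fact => fact.1 == entity)

def pvFilterByAttribute (facts : List (String × String × String × Bool)) (attrib : String × String × String) :
    List (String × String × String × Bool) :=
  facts.filter (fun fact => fact.2.1 == attrib.1)

-- fact.remove(previousFact) is guarded by membership: List.erase removes the first
-- occurrence, exactly Python's list.remove there (PySem.List.remove?_eq_some_erase).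
def pvFilterByActive (facts : List (String × String × String × Bool)) :
    List (String × String × String × Bool) :=
  facts.foldl (fun filtered fact =>
    if fact.2.2.2 then filtered ++ [fact]
    else
      let previousFact := (fact.1, fact.2.1, fact.2.2.1, true)
      if previousFact ∈ filtered then filtered.erase previousFact else filtered) []

def filter_facts (facts : List (String × String × String × Bool)) (schema : List (String × String × String)) : List (String × String × String × Bool) :=
  let facts1 := pvFilterByActive facts
  let names := pvGetNames facts1
  let current_facts := names.foldl (fun current_facts entity =>
    let filtered_by_entity := pvFilterByEntity facts1 entity
    let fully_filtered := schema.foldl (fun fully_filtered attr =>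
      let filtered_by_attr := pvFilterByAttribute filtered_by_entity attr
      let filtered_by_attr :=
        if attr.2.2 == "one" && decide (0 < filtered_by_attr.length) then
          -- filtered_by_attr[-1] under the length guard
          match PySem.List.pyGet? filtered_by_attr (-1) with
          | some x => [x]
          | none => []
        else filtered_by_attr
      fully_filtered ++ filtered_by_attr) []
    current_facts ++ fully_filtered) []
  PySem.List.sorted current_facts pvKey false

-- ===== PORT B =====
def pvCounts (facts : List (String × String × String × Bool)) :
    PySem.Dict (String × String × String) Int :=
  facts.foldl (fun c f =>
    let k := (f.1, f.2.1, f.2.2.1)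
    if f.2.2.2 then c.insert k (c.getD k 0 + 1)
    else if 0 < c.getD k 0 then c.insert k (c.getD k 0 - 1) else c) PySem.Dict.empty

def pvLastDict (facts : List (String × String × String × Bool))
    (c : PySem.Dict (String × String × String) Int) :
    PySem.Dict (String × String) (String × String × String × Bool) :=
  facts.foldl (fun last f =>
    if f.2.2.2 && decide (0 < c.getD (f.1, f.2.1, f.2.2.1) 0) then
      last.insert (f.1, f.2.1) (f.1, f.2.1, f.2.2.1, true)
    else last) PySem.Dict.empty

def filter_facts_alt (facts : List (String × String × String × Bool)) (schema : List (String × String × String)) : List (String × String × String × Bool) :=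
  let c := pvCounts facts
  let last := pvLastDict facts c
  let out := c.items.foldl (fun out kn =>
    if 0 < kn.2 then
      schema.foldl (fun out attr =>
        if attr.1 == kn.1.2.1 then
          if attr.2.2 == "one" then
            if last.get? (kn.1.1, kn.1.2.1) == some (kn.1.1, kn.1.2.1, kn.1.2.2, true) then
              out ++ [(kn.1.1, kn.1.2.1, kn.1.2.2, true)]
            else out
          else out ++ PySem.List.pyRepeat [(kn.1.1, kn.1.2.1, kn.1.2.2, true)] kn.2
        else out) out
    else out) []
  PySem.List.sorted out pvKey false

-- ===== PRECONDITION & SPEC =====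
def Spec_filter_facts (facts : List (String × String × String × Bool)) (schema : List (String × String × String)) (out : List (String × String × String × Bool)) : Prop := out = filter_facts_alt facts schema
instance (facts : List (String × String × String × Bool)) (schema : List (String × String × String)) (out : List (String × String × String × Bool)) : Decidable (Spec_filter_facts facts schema out) := by unfold Spec_filter_facts; infer_instance

-- ===== CLAIM (what is proved, stated in full; the proofs are below) =====
def Claim_equal_filter_facts : Prop := ∀ (facts : List (String × String × String × Bool)) (schema : List (String × String × String)), Dom_filter_facts facts schema → Spec_filter_facts facts schema (filter_facts facts schema)

-- ===== LEMMAS AND PROOFS =====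

-- the fact tuple a key stands for, and the key of a fact
def pvTup (k : String × String × String) : String × String × String × Bool := (k.1, k.2.1, k.2.2, true)
def pvKeyOf (f : String × String × String × Bool) : String × String × String := (f.1, f.2.1, f.2.2.1)

-- drop, per value, the first d(x) occurrences of x from l
def pvD (l : List (String × String × String × Bool)) (d : (String × String × String × Bool) → Nat) :
    List (String × String × String × Bool) :=
  match l with
  | [] => []
  | x :: xs => if 0 < d x then pvD xs (Function.update d x (d x - 1)) else x :: pvD xs d

def pvActives (l : List (String × String × String × Bool)) : List (String × String × String × Bool) :=
  l.filter (fun f => f.2.2.2)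

def pvPop (l : List (String × String × String × Bool)) (x : String × String × String × Bool) : Nat :=
  (pvActives l).count x - ((pvCounts l).getD (pvKeyOf x) 0).toNat

theorem pvKey_injective : Function.Injective pvKey := by
  intro a b h
  simp only [pvKey, toLex_inj, Prod.mk.injEq] at h
  obtain ⟨h1, h2, h3, h4⟩ := h
  exact Prod.ext h1 (Prod.ext h2 (Prod.ext h3 h4))

theorem pvD_append (l : List (String × String × String × Bool)) (d : (String × String × String × Bool) → Nat) (x : String × String × String × Bool) (h : d x ≤ l.count x) :
    pvD (l ++ [x]) d = pvD l d ++ [x] := by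
  induction l generalizing d with
  | nil =>
    have hx : d x = 0 := by simpa using h
    simp [pvD, hx]
  | cons y ys ih =>
    simp only [List.cons_append, pvD]
    by_cases hy : 0 < d y
    · rw [if_pos hy, if_pos hy, ih]
      by_cases hxy : y = x
      · subst hxy
        rw [List.count_cons_self] at h
        simp [Function.update_apply]
        omega
      · rw [List.count_cons_of_ne hxy] at h
        simpa [Function.update_apply, hxy, Ne.symm hxy] using h
    · rw [if_neg hy, if_neg hy, List.cons_append, ih]
      by_cases hxy : y = x
      · subst hxy; omega
      · rwa [List.count_cons_of_ne hxy] at h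

theorem pvD_mem (l : List (String × String × String × Bool)) (d : (String × String × String × Bool) → Nat) (x : String × String × String × Bool) :
    x ∈ pvD l d ↔ d x < l.count x := by
  induction l generalizing d with
  | nil => simp [pvD]
  | cons y ys ih =>
    simp only [pvD]
    by_cases hy : 0 < d y
    · rw [if_pos hy, ih]
      by_cases hxy : x = y
      · subst hxy; simp [Function.update_apply, List.count_cons_self]; omega
      · rw [Function.update_apply, if_neg hxy, List.count_cons_of_ne (fun hh => hxy (Eq.symm hh))]
    · rw [if_neg hy]
      by_cases hxy : x = y
      · subst hxy
        simp [List.count_cons_self]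
        omega
      · simp only [List.mem_cons, ih, List.count_cons_of_ne (fun hh => hxy (Eq.symm hh))]
        constructor
        · rintro (h | h); exact absurd h hxy; exact h
        · exact fun h => Or.inr h

theorem pvD_count (l : List (String × String × String × Bool)) (d : (String × String × String × Bool) → Nat) (t : String × String × String × Bool) :
    (pvD l d).count t = l.count t - d t := by
  induction l generalizing d with
  | nil => simp [pvD]
  | cons y ys ih =>
    simp only [pvD]
    by_cases hy : 0 < d y
    · rw [if_pos hy, ih]
      by_cases hxy : t = y
      · subst hxy; simp [Function.update_apply, List.count_cons_self]; omega
      · rw [Function.update_apply, if_neg hxy, List.count_cons_of_ne (fun hh => hxy (Eq.symm hh))]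
    · rw [if_neg hy]
      by_cases hxy : t = y
      · subst hxy
        have : d t = 0 := by omega
        simp [List.count_cons_self, ih, this]
      · rw [List.count_cons_of_ne (fun hh => hxy (Eq.symm hh)), ih, List.count_cons_of_ne (fun hh => hxy (Eq.symm hh))]

theorem pvD_erase (l : List (String × String × String × Bool)) (d : (String × String × String × Bool) → Nat) (t : String × String × String × Bool) (h : d t < l.count t) :
    pvD l (Function.update d t (d t + 1)) = (pvD l d).erase t := by
  induction l generalizing d with
  | nil => simp at h
  | cons y ys ih =>
    simp only [pvD]
    by_cases hxy : y = t
    · subst hxy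
      rw [List.count_cons_self] at h
      rw [if_pos (show 0 < Function.update d y (d y + 1) y by simp)]
      have hcollapse : Function.update (Function.update d y (d y + 1)) y
          (Function.update d y (d y + 1) y - 1) = d := by
        funext z; by_cases hz : z = y <;> simp [Function.update_apply, hz]
      rw [hcollapse]
      by_cases hy : 0 < d y
      · rw [if_pos hy]
        have h2 : (Function.update d y (d y - 1)) y < ys.count y := by simp; omega
        have hdd : Function.update (Function.update d y (d y - 1)) y
            ((Function.update d y (d y - 1)) y + 1) = d := by
          funext z; by_cases hz : z = y <;> simp [Function.update_apply, hz]; omega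
        have := ih (Function.update d y (d y - 1)) h2
        rw [hdd] at this
        exact this
      · rw [if_neg hy]
        simp
    · have hyt : Function.update d t (d t + 1) y = d y := by
        simp [Function.update_apply, hxy]
      rw [List.count_cons_of_ne hxy] at h
      by_cases hy : 0 < d y
      · rw [if_pos (by rw [hyt]; exact hy), if_pos hy]
        have hswap : Function.update (Function.update d t (d t + 1)) y
              (Function.update d t (d t + 1) y - 1)
            = Function.update (Function.update d y (d y - 1)) t
              ((Function.update d y (d y - 1)) t + 1) := by
          funext z
          by_cases hz1 : z = y
          · subst hz1
            simp [Function.update_apply, hxy]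
          · by_cases hz2 : z = t
            · subst hz2
              simp [Function.update_apply, hz1, hxy]
            · simp [Function.update_apply, hz1, hz2]
        have hty : t ≠ y := fun hh => hxy hh.symm
        have h2 : (Function.update d y (d y - 1)) t < ys.count t := by
          simpa [Function.update_apply, hty] using h
        rw [hswap, ih _ h2]
      · rw [if_neg (by rw [hyt]; exact hy), if_neg hy]
        rw [ih d h, List.erase_cons_tail (by simp [hxy])]

theorem getLast?_cons_congr {α : Type} (x : α) {t1 t2 : List α} (h : t1.getLast? = t2.getLast?) :
    (x :: t1).getLast? = (x :: t2).getLast? := by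
  rw [List.getLast?_cons, List.getLast?_cons, h]

theorem pvD_getLast?_filter (l : List (String × String × String × Bool)) (d : (String × String × String × Bool) → Nat) (p : (String × String × String × Bool) → Bool) :
    ((pvD l d).filter p).getLast? = (l.filter (fun y => p y && decide (d y < l.count y))).getLast? := by
  induction l generalizing d with
  | nil => simp [pvD]
  | cons x xs ih =>
    simp only [pvD]
    by_cases hx : 0 < d x
    · rw [if_pos hx, ih]
      have hpt : xs.filter (fun y => p y && decide (Function.update d x (d x - 1) y < xs.count y))
          = xs.filter (fun y => p y && decide (d y < (x :: xs).count y)) := by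
        apply List.filter_congr
        intro y hy
        by_cases hyx : y = x
        · subst hyx
          have hupd : Function.update d y (d y - 1) y = d y - 1 := by simp
          rw [hupd, List.count_cons_self]
          congr 1
          exact decide_eq_decide.mpr (by omega)
        · rw [Function.update_apply, if_neg hyx,
            List.count_cons_of_ne (fun hh => hyx (Eq.symm hh))]
      rw [hpt]
      by_cases hqx : (p x && decide (d x < (x :: xs).count x)) = true
      · rw [List.filter_cons, if_pos hqx]
        have hxs : 0 < xs.count x := by
          have := of_decide_eq_true (Bool.and_elim_right hqx)
          rw [List.count_cons_self] at this
          omega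
        have hmem : x ∈ xs.filter (fun y => p y && decide (d y < (x :: xs).count y)) :=
          List.mem_filter.mpr ⟨List.count_pos_iff.mp hxs, hqx⟩
        have hne : xs.filter (fun y => p y && decide (d y < (x :: xs).count y)) ≠ [] :=
          List.ne_nil_of_mem hmem
        rw [List.getLast?_cons]
        obtain ⟨v, hv⟩ := Option.isSome_iff_exists.mp (List.getLast?_isSome.mpr hne)
        rw [hv]
        simp
      · rw [List.filter_cons, if_neg hqx]
    · rw [if_neg hx]
      have h0 : d x = 0 := by omega
      have htail : ((pvD xs d).filter p).getLast?
          = (xs.filter (fun y => p y && decide (d y < (x :: xs).count y))).getLast? := by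
        rw [ih]
        congr 1
        apply List.filter_congr
        intro y hy
        by_cases hyx : y = x
        · subst hyx
          have : 0 < xs.count y := List.count_pos_iff.mpr hy
          simp only [List.count_cons_self]
          congr 1
          exact decide_eq_decide.mpr (by omega)
        · rw [List.count_cons_of_ne (fun hh => hyx (Eq.symm hh))]
      by_cases hp : p x = true
      · rw [List.filter_cons, List.filter_cons,
          if_pos (show (p x && decide (d x < (x :: xs).count x)) = true by
            simp [hp, h0, List.count_cons_self]), if_pos hp]
        exact getLast?_cons_congr x htail
      · rw [List.filter_cons, List.filter_cons, if_neg (by simp [hp]), if_neg (by simp [hp])]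
        exact htail

-- closed form of A's filter_by_active, plus the count invariants of B's first pass
theorem pvActives_count_eq_zero (l : List (String × String × String × Bool))
    (x : String × String × String × Bool) (h : x.2.2.2 ≠ true) : (pvActives l).count x = 0 := by
  rw [List.count_eq_zero]
  intro hx
  simp only [pvActives, List.mem_filter] at hx
  exact h hx.2

theorem pvCF (l : List (String × String × String × Bool)) :
    pvFilterByActive l = pvD (pvActives l) (pvPop l) ∧
      ∀ k, 0 ≤ (pvCounts l).getD k 0 ∧
        ((pvCounts l).getD k 0).toNat ≤ (pvActives l).count (pvTup k) := by
  induction l using List.reverseRecOn with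
  | nil =>
    refine ⟨by simp [pvFilterByActive, pvActives, pvD], fun k => ?_⟩
    simp [pvCounts, pvActives]
  | append_singleton l f ih =>
    obtain ⟨ihA, ihB⟩ := ih
    have hFA : pvFilterByActive (l ++ [f]) =
        (if f.2.2.2 then pvFilterByActive l ++ [f]
         else if (f.1, f.2.1, f.2.2.1, true) ∈ pvFilterByActive l then
            (pvFilterByActive l).erase (f.1, f.2.1, f.2.2.1, true)
          else pvFilterByActive l) := by
      simp [pvFilterByActive, List.foldl_append]
    have hC : pvCounts (l ++ [f]) =
        (if f.2.2.2 then
          (pvCounts l).insert (f.1, f.2.1, f.2.2.1) ((pvCounts l).getD (f.1, f.2.1, f.2.2.1) 0 + 1)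
         else if 0 < (pvCounts l).getD (f.1, f.2.1, f.2.2.1) 0 then
          (pvCounts l).insert (f.1, f.2.1, f.2.2.1) ((pvCounts l).getD (f.1, f.2.1, f.2.2.1) 0 - 1)
         else pvCounts l) := by
      simp [pvCounts, List.foldl_append]
    by_cases hact : f.2.2.2 = true
    · -- an assertion is appended
      have hf : (f.1, f.2.1, f.2.2.1, true) = f := by rw [← hact]
      have hAct : pvActives (l ++ [f]) = pvActives l ++ [f] := by
        simp [pvActives, List.filter_append, hact]
      rw [hFA, hC, if_pos hact, if_pos hact]
      have hgetD : ∀ k, (((pvCounts l).insert (f.1, f.2.1, f.2.2.1) ((pvCounts l).getD (f.1, f.2.1, f.2.2.1) 0 + 1)).getD k 0)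
          = if k = (f.1, f.2.1, f.2.2.1) then (pvCounts l).getD (f.1, f.2.1, f.2.2.1) 0 + 1 else (pvCounts l).getD k 0 := by
        intro k; rw [PySem.Dict.getD_insert]
      have hpop : pvPop (l ++ [f]) = pvPop l := by
        funext x
        have hcf : List.count x [f] = if x = f then 1 else 0 := by
          by_cases hx : x = f
          · simp [List.count_cons, List.count_nil, hx]
          · rw [if_neg hx]
            exact List.count_eq_zero.mpr (by simp [hx])
        simp only [pvPop, pvKeyOf, hAct, List.count_append, hC, if_pos hact, hgetD, hcf]
        by_cases hx : x = f
        · rw [if_pos hx, if_pos (by rw [hx])]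
          have h0 := (ihB (x.1, x.2.1, x.2.2.1)).1
          rw [show (f.1, f.2.1, f.2.2.1) = (x.1, x.2.1, x.2.2.1) by rw [hx]]
          omega
        · rw [if_neg hx]
          by_cases hk : (x.1, x.2.1, x.2.2.1) = (f.1, f.2.1, f.2.2.1)
          · rw [if_pos hk]
            have hxf : x.2.2.2 ≠ true := by
              intro hb
              apply hx
              obtain ⟨e1, e2, e3⟩ : x.1 = f.1 ∧ x.2.1 = f.2.1 ∧ x.2.2.1 = f.2.2.1 := by
                simpa [Prod.ext_iff] using hk
              have : x = (x.1, x.2.1, x.2.2.1, x.2.2.2) := rfl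
              rw [this, hb, e1, e2, e3, hf]
            have hz : (pvActives l).count x = 0 := pvActives_count_eq_zero l x hxf
            have h0 := (ihB (f.1, f.2.1, f.2.2.1)).1
            rw [hz, hk]
            omega
          · rw [if_neg hk]
            omega
      rw [hAct, hpop]
      refine ⟨by rw [pvD_append _ _ _ (Nat.sub_le _ _), ihA], fun k => ?_⟩
      rw [hgetD, List.count_append]
      by_cases hk : k = (f.1, f.2.1, f.2.2.1)
      · rw [if_pos hk]
        have h0 := ihB k
        have h1 : List.count (pvTup k) [f] = 1 := by
          rw [show pvTup k = f by rw [hk]; exact hf]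
          simp
        rw [h1]
        have h2 := (ihB (f.1, f.2.1, f.2.2.1)).1
        rw [← hk] at h2 ⊢
        omega
      · rw [if_neg hk]
        have h0 := ihB k
        have h1 : List.count (pvTup k) [f] = 0 := by
          rw [List.count_eq_zero]
          intro hmem
          rw [List.mem_singleton] at hmem
          rw [← hf] at hmem
          exact hk (congrArg pvKeyOf hmem)
        omega
    · -- a retraction
      have hAct : pvActives (l ++ [f]) = pvActives l := by
        simp [pvActives, List.filter_append, hact]
      rw [hFA, hC, if_neg hact, if_neg hact]
      by_cases hpos : 0 < (pvCounts l).getD (f.1, f.2.1, f.2.2.1) 0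
      · rw [if_pos hpos]
        have hcount := (ihB (f.1, f.2.1, f.2.2.1)).2
        have hmemcnt : pvPop l (f.1, f.2.1, f.2.2.1, true) <
            (pvActives l).count (f.1, f.2.1, f.2.2.1, true) := by
          simp only [pvPop, pvKeyOf, pvTup] at *
          omega
        have hmem : (f.1, f.2.1, f.2.2.1, true) ∈ pvFilterByActive l := by
          rw [ihA, pvD_mem]; exact hmemcnt
        rw [if_pos hmem]
        have hgetD : ∀ k, (((pvCounts l).insert (f.1, f.2.1, f.2.2.1) ((pvCounts l).getD (f.1, f.2.1, f.2.2.1) 0 - 1)).getD k 0)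
            = if k = (f.1, f.2.1, f.2.2.1) then (pvCounts l).getD (f.1, f.2.1, f.2.2.1) 0 - 1 else (pvCounts l).getD k 0 := by
          intro k; rw [PySem.Dict.getD_insert]
        have hpop : pvPop (l ++ [f]) =
            Function.update (pvPop l) (f.1, f.2.1, f.2.2.1, true) (pvPop l (f.1, f.2.1, f.2.2.1, true) + 1) := by
          funext x
          rw [Function.update_apply]
          by_cases hx : x = (f.1, f.2.1, f.2.2.1, true)
          · rw [if_pos hx]
            simp only [pvPop, pvKeyOf, pvTup, hAct, hC, if_neg hact, if_pos hpos, hgetD]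
            rw [show (x.1, x.2.1, x.2.2.1) = (f.1, f.2.1, f.2.2.1) by rw [hx], if_pos rfl,
              show x = (f.1, f.2.1, f.2.2.1, true) from hx]
            simp only [pvTup] at hcount
            omega
          · rw [if_neg hx]
            simp only [pvPop, pvKeyOf, hAct, hC, if_neg hact, if_pos hpos, hgetD]
            by_cases hk : (x.1, x.2.1, x.2.2.1) = (f.1, f.2.1, f.2.2.1)
            · rw [if_pos hk]
              have hxf : x.2.2.2 ≠ true := by
                intro hb
                apply hx
                obtain ⟨e1, e2, e3⟩ : x.1 = f.1 ∧ x.2.1 = f.2.1 ∧ x.2.2.1 = f.2.2.1 := by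
                  simpa [Prod.ext_iff] using hk
                have : x = (x.1, x.2.1, x.2.2.1, x.2.2.2) := rfl
                rw [this, hb, e1, e2, e3]
              have hz : (pvActives l).count x = 0 := pvActives_count_eq_zero l x hxf
              rw [hz, hk]
              omega
            · rw [if_neg hk]
        rw [hAct, hpop, pvD_erase _ _ _ hmemcnt, ihA]
        refine ⟨rfl, fun k => ?_⟩
        rw [hgetD]
        have h0 := ihB k
        by_cases hk : k = (f.1, f.2.1, f.2.2.1)
        · rw [if_pos hk]
          subst hk
          have h2 := ihB (f.1, f.2.1, f.2.2.1)
          simp only [pvTup] at h2 ⊢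
          omega
        · rw [if_neg hk]
          omega
      · rw [if_neg hpos]
        have hnotmem : (f.1, f.2.1, f.2.2.1, true) ∉ pvFilterByActive l := by
          rw [ihA, pvD_mem]
          have h0 := (ihB (f.1, f.2.1, f.2.2.1)).1
          simp only [pvPop, pvTup, pvKeyOf]
          omega
        rw [if_neg hnotmem, hAct]
        have hpop : pvPop (l ++ [f]) = pvPop l := by
          funext x
          simp only [pvPop, hAct, hC, if_neg hact, if_neg hpos]
        exact ⟨ihA.trans (by rw [hpop]), ihB⟩

theorem pvM1 (l : List (String × String × String × Bool)) (k : String × String × String) :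
    (pvFilterByActive l).count (pvTup k) = ((pvCounts l).getD k 0).toNat := by
  obtain ⟨hA, hB⟩ := pvCF l
  rw [hA, pvD_count]
  have h := hB k
  have hk : pvKeyOf (pvTup k) = k := rfl
  simp only [pvPop, hk]
  omega

theorem pvLD (l : List (String × String × String × Bool))
    (c : PySem.Dict (String × String × String) Int) (e a : String) :
    (pvLastDict l c).get? (e, a) =
      ((l.filter (fun f => (f.2.2.2 && decide (0 < c.getD (f.1, f.2.1, f.2.2.1) 0)) &&
          (f.1 == e && f.2.1 == a))).map (fun f => (f.1, f.2.1, f.2.2.1, true))).getLast? := by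
  induction l using List.reverseRecOn with
  | nil => simp [pvLastDict]
  | append_singleton l f ih =>
    have hLD : pvLastDict (l ++ [f]) c =
        (if f.2.2.2 && decide (0 < c.getD (f.1, f.2.1, f.2.2.1) 0) then
          (pvLastDict l c).insert (f.1, f.2.1) (f.1, f.2.1, f.2.2.1, true)
         else pvLastDict l c) := by
      simp [pvLastDict, List.foldl_append]
    rw [hLD, List.filter_append]
    by_cases hq : (f.2.2.2 && decide (0 < c.getD (f.1, f.2.1, f.2.2.1) 0)) = true
    · rw [if_pos hq]
      by_cases hkey : f.1 = e ∧ f.2.1 = a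
      · have hfilter : List.filter (fun f => (f.2.2.2 && decide (0 < c.getD (f.1, f.2.1, f.2.2.1) 0)) &&
            (f.1 == e && f.2.1 == a)) [f] = [f] := by
          simp only [List.filter_cons, List.filter_nil]
          rw [if_pos (by rw [hq, hkey.1, hkey.2]; simp)]
        rw [hfilter, List.map_append]
        simp only [List.map_cons, List.map_nil]
        rw [List.getLast?_concat, PySem.Dict.get?_insert, if_pos (by rw [hkey.1, hkey.2])]
      · have hpred : ((f.2.2.2 && decide (0 < c.getD (f.1, f.2.1, f.2.2.1) 0)) &&
            (f.1 == e && f.2.1 == a)) = false := by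
          rcases not_and_or.mp hkey with hne | hne <;> simp [hne]
        have hfilter : List.filter (fun f => (f.2.2.2 && decide (0 < c.getD (f.1, f.2.1, f.2.2.1) 0)) &&
            (f.1 == e && f.2.1 == a)) [f] = [] := by
          rw [List.filter_cons, if_neg (by rw [hpred]; exact Bool.false_ne_true), List.filter_nil]
        rw [hfilter, List.append_nil, PySem.Dict.get?_insert,
          if_neg (fun hh => hkey ⟨by have h1 := congrArg Prod.fst hh; simpa using h1.symm,
            by have h2 := congrArg Prod.snd hh; simpa using h2.symm⟩), ih]
    · rw [if_neg hq]
      have hq' : (f.2.2.2 && decide (0 < c.getD (f.1, f.2.1, f.2.2.1) 0)) = false := by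
        simpa using hq
      have hpred : ((f.2.2.2 && decide (0 < c.getD (f.1, f.2.1, f.2.2.1) 0)) &&
          (f.1 == e && f.2.1 == a)) = false := by
        rw [hq']; simp
      have hfilter : List.filter (fun f => (f.2.2.2 && decide (0 < c.getD (f.1, f.2.1, f.2.2.1) 0)) &&
          (f.1 == e && f.2.1 == a)) [f] = [] := by
        rw [List.filter_cons, if_neg (by rw [hpred]; exact Bool.false_ne_true), List.filter_nil]
      rw [hfilter, List.append_nil, ih]

theorem pvM2 (l : List (String × String × String × Bool)) (e a : String) :
    ((pvFilterByActive l).filter (fun y => y.1 == e && y.2.1 == a)).getLast? =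
      (pvLastDict l (pvCounts l)).get? (e, a) := by
  obtain ⟨hA, hB⟩ := pvCF l
  rw [hA, pvD_getLast?_filter, pvLD]
  simp only [pvActives]
  rw [List.filter_filter]
  have hfc : List.filter (fun y => y.1 == e && y.2.1 == a &&
        decide (pvPop l y < List.count y (List.filter (fun f => f.2.2.2) l)) && y.2.2.2) l
      = List.filter (fun f => f.2.2.2 && decide (0 < (pvCounts l).getD (f.1, f.2.1, f.2.2.1) 0) &&
        (f.1 == e && f.2.1 == a)) l := by
    apply List.filter_congr
    intro y hy
    by_cases hact : y.2.2.2 = true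
    · have hmem : y ∈ List.filter (fun f => f.2.2.2) l := List.mem_filter.mpr ⟨hy, hact⟩
      have hcnt : 0 < List.count y (List.filter (fun f => f.2.2.2) l) := List.count_pos_iff.mpr hmem
      have hb := hB (pvKeyOf y)
      have htup : pvTup (pvKeyOf y) = y := by
        have hyy : y = (y.1, y.2.1, y.2.2.1, y.2.2.2) := rfl
        simp only [pvTup, pvKeyOf]
        rw [hyy, hact]
      rw [htup] at hb
      simp only [pvActives] at hb
      have hiff : (pvPop l y < List.count y (List.filter (fun f => f.2.2.2) l)) ↔
          (0 < (pvCounts l).getD (y.1, y.2.1, y.2.2.1) 0) := by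
        simp only [pvPop, pvKeyOf, pvActives] at *
        omega
      have hdec : decide (pvPop l y < List.count y (List.filter (fun f => f.2.2.2) l))
          = decide (0 < (pvCounts l).getD (y.1, y.2.1, y.2.2.1) 0) := decide_eq_decide.mpr hiff
      rw [hdec]
      cases hce : (y.1 == e) <;> cases hca : (y.2.1 == a) <;> simp [hact]
    · have hact' : y.2.2.2 = false := by simpa using hact
      simp [hact']
  have hmapid : List.map (fun f => (f.1, f.2.1, f.2.2.1, true))
      (List.filter (fun f => f.2.2.2 && decide (0 < (pvCounts l).getD (f.1, f.2.1, f.2.2.1) 0) &&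
        (f.1 == e && f.2.1 == a)) l)
      = List.filter (fun f => f.2.2.2 && decide (0 < (pvCounts l).getD (f.1, f.2.1, f.2.2.1) 0) &&
        (f.1 == e && f.2.1 == a)) l := by
    have hcg : ∀ x ∈ List.filter (fun f => f.2.2.2 && decide (0 < (pvCounts l).getD (f.1, f.2.1, f.2.2.1) 0) &&
        (f.1 == e && f.2.1 == a)) l, (x.1, x.2.1, x.2.2.1, true) = id x := by
      intro x hx
      have hmf := List.mem_filter.mp hx
      have hact : x.2.2.2 = true := by
        have h1 := hmf.2
        simp only [Bool.and_eq_true] at h1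
        exact h1.1.1
      have hxx : x = (x.1, x.2.1, x.2.2.1, x.2.2.2) := rfl
      simp only [id]
      rw [hxx, hact]
    rw [List.map_congr_left hcg, List.map_id]
  congr 1
  rw [hmapid]
  exact hfc

theorem pyGetNeg1 {α : Type} (xs : List α) : PySem.List.pyGet? xs (-1) = xs.getLast? := by
  simp only [PySem.List.pyGet?, PySem.List.pyIdx?]
  rcases xs with _ | ⟨y, ys⟩
  · simp
  · simp [List.getLast?_eq_getElem?]

theorem sum_single {α : Type} [DecidableEq α] (names : List α) (f : α → Nat) (w : α)
    (hnd : names.Nodup) (hf : ∀ e ∈ names, e ≠ w → f e = 0) :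
    (names.map f).sum = if w ∈ names then f w else 0 := by
  induction names with
  | nil => simp
  | cons e es ih =>
    simp only [List.map_cons, List.sum_cons, List.mem_cons]
    by_cases hew : e = w
    · subst hew
      have hz : (es.map f).sum = 0 := by
        apply List.sum_eq_zero
        intro y hy
        obtain ⟨z, hz, hzz⟩ := List.mem_map.mp hy
        rw [← hzz]
        exact hf z (List.mem_cons_of_mem _ hz) (fun hzw => (List.nodup_cons.mp hnd).1 (hzw ▸ hz))
      rw [hz, if_pos (Or.inl rfl)]
      omega
    · rw [hf e (List.mem_cons_self) hew, ih (List.nodup_cons.mp hnd).2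
        (fun z hz hzw => hf z (List.mem_cons_of_mem _ hz) hzw)]
      by_cases hw : w ∈ es
      · rw [if_pos hw, if_pos (Or.inr hw)]
        omega
      · rw [if_neg hw, if_neg (by rintro (h | h); exact hew h.symm; exact hw h)]

theorem count_flatMap {α β : Type} [BEq β] (l : List α) (g : α → List β) (a : β) :
    (l.flatMap g).count a = (l.map (fun y => (g y).count a)).sum := by
  induction l with
  | nil => simp
  | cons x xs ih => simp [List.flatMap_cons, List.count_append, ih]

theorem sum_swap_list {α β : Type} (l : List α) (m : List β) (f : α → β → Nat) :
    (l.map (fun x => (m.map (f x)).sum)).sum = (m.map (fun y => (l.map (fun x => f x y)).sum)).sum := by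
  induction l with
  | nil => simp
  | cons x xs ih =>
    simp only [List.map_cons, List.sum_cons, ih]
    induction m with
    | nil => simp
    | cons y ys ihm => simp [ihm]; ring

theorem list_sum_single_pair {κ : Type} [DecidableEq κ] (ps : List (κ × Int)) (f : κ × Int → Nat)
    (k0 : κ) (v : Int) (hnd : (ps.map Prod.fst).Nodup) (hf : ∀ p ∈ ps, p.1 ≠ k0 → f p = 0)
    (hmem : (k0, v) ∈ ps) : (ps.map f).sum = f (k0, v) := by
  induction ps with
  | nil => simp at hmem
  | cons p ps ih =>
    simp only [List.map_cons, List.sum_cons]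
    rw [List.map_cons] at hnd
    have hnd' := List.nodup_cons.mp hnd
    rcases List.mem_cons.mp hmem with heq | hmem'
    · rw [← heq]
      have hz : (ps.map f).sum = 0 := by
        apply List.sum_eq_zero
        intro y hy
        obtain ⟨q, hq, hqq⟩ := List.mem_map.mp hy
        rw [← hqq]
        refine hf q (List.mem_cons_of_mem _ hq) (fun hqk => hnd'.1 ?_)
        rw [show p.1 = k0 by rw [← heq], ← hqk]
        exact List.mem_map.mpr ⟨q, hq, rfl⟩
      rw [hz]
      omega
    · have hpk : p.1 ≠ k0 := by
        intro hpk
        apply hnd'.1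
        rw [hpk]
        exact List.mem_map.mpr ⟨(k0, v), hmem', rfl⟩
      rw [hf p (List.mem_cons_self) hpk, ih hnd'.2
        (fun q hq hqk => hf q (List.mem_cons_of_mem _ hq) hqk) hmem']
      omega

theorem dict_sum_single (d : PySem.Dict (String × String × String) Int)
    (f : (String × String × String) × Int → Nat) (k0 : String × String × String)
    (hnd : d.keys.Nodup) (hf : ∀ p ∈ d.items, p.1 ≠ k0 → f p = 0) :
    (d.items.map f).sum = (match d.get? k0 with | some v => f (k0, v) | none => 0) := by
  have hnd' : (d.items.map Prod.fst).Nodup := hnd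
  cases hg : d.get? k0 with
  | none =>
    apply List.sum_eq_zero
    intro y hy
    obtain ⟨q, hq, hqq⟩ := List.mem_map.mp hy
    rw [← hqq]
    refine hf q hq (fun hqk => ?_)
    rw [PySem.Dict.get?_eq_none_iff_not_mem_keys] at hg
    exact hg (hqk ▸ PySem.Dict.mem_keys_of_mem_items d hq)
  | some v =>
    exact list_sum_single_pair d.items f k0 v hnd' hf (PySem.Dict.mem_items_of_get?_eq_some d hg)

theorem pvCounts_nodup_keys (l : List (String × String × String × Bool)) :
    (pvCounts l).keys.Nodup := by
  induction l using List.reverseRecOn with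
  | nil => exact PySem.Dict.nodup_keys_empty
  | append_singleton l f ih =>
    have hC : pvCounts (l ++ [f]) =
        (if f.2.2.2 then
          (pvCounts l).insert (f.1, f.2.1, f.2.2.1) ((pvCounts l).getD (f.1, f.2.1, f.2.2.1) 0 + 1)
         else if 0 < (pvCounts l).getD (f.1, f.2.1, f.2.2.1) 0 then
          (pvCounts l).insert (f.1, f.2.1, f.2.2.1) ((pvCounts l).getD (f.1, f.2.1, f.2.2.1) 0 - 1)
         else pvCounts l) := by
      simp [pvCounts, List.foldl_append]
    rw [hC]
    split_ifs <;> first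
      | exact PySem.Dict.nodup_keys_insert _ _ _ ih
      | exact ih

theorem pvNames (l : List (String × String × String × Bool)) :
    pvGetNames l = PySem.Set.ofList (l.map (·.1)) := by
  rw [PySem.Set.ofList_eq_foldl, List.foldl_map]
  unfold pvGetNames
  apply PySem.List.foldl_congr_mem
  intro acc f hf
  by_cases hmem : f.1 ∈ acc
  · simp [PySem.Set.add, hmem]
  · simp [PySem.Set.add, hmem]

theorem pvActMem (facts : List (String × String × String × Bool))
    (x : String × String × String × Bool) (h : x ∈ pvFilterByActive facts) :
    x ∈ pvActives facts := by
  rw [(pvCF facts).1, pvD_mem] at h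
  exact List.count_pos_iff.mp (by omega)

-- the two selection functions, as flatMap bodies
def pvSelA (facts : List (String × String × String × Bool)) (e : String)
    (attr : String × String × String) : List (String × String × String × Bool) :=
  let fba := pvFilterByAttribute (pvFilterByEntity (pvFilterByActive facts) e) attr
  if attr.2.2 == "one" && decide (0 < fba.length) then
    (match PySem.List.pyGet? fba (-1) with | some x => [x] | none => [])
  else fba

def pvSelB (last : PySem.Dict (String × String) (String × String × String × Bool))
    (kn : (String × String × String) × Int) (attr : String × String × String) :
    List (String × String × String × Bool) :=
  if attr.1 == kn.1.2.1 then
    if attr.2.2 == "one" then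
      (if last.get? (kn.1.1, kn.1.2.1) == some (kn.1.1, kn.1.2.1, kn.1.2.2, true) then
        [(kn.1.1, kn.1.2.1, kn.1.2.2, true)] else [])
    else PySem.List.pyRepeat [(kn.1.1, kn.1.2.1, kn.1.2.2, true)] kn.2
  else []

theorem pvA_flat (facts : List (String × String × String × Bool)) (schema : List (String × String × String)) :
    filter_facts facts schema = PySem.List.sorted
      ((pvGetNames (pvFilterByActive facts)).flatMap
        (fun e => schema.flatMap (fun attr => pvSelA facts e attr))) pvKey false := by
  unfold filter_facts pvSelA
  simp only [PySem.List.foldl_append_eq_flatMap, List.nil_append]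

theorem pvB_flat (facts : List (String × String × String × Bool)) (schema : List (String × String × String)) :
    filter_facts_alt facts schema = PySem.List.sorted
      ((pvCounts facts).items.flatMap
        (fun kn => if 0 < kn.2 then
          schema.flatMap (fun attr => pvSelB (pvLastDict facts (pvCounts facts)) kn attr)
        else [])) pvKey false := by
  simp only [filter_facts_alt]
  congr 1
  rw [PySem.List.foldl_congr_mem _ _
    (fun out kn => out ++ (if 0 < kn.2 then
      schema.flatMap (fun attr => pvSelB (pvLastDict facts (pvCounts facts)) kn attr) else [])) []
    ?_, PySem.List.foldl_append_eq_flatMap, List.nil_append]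
  intro acc kn hkn
  dsimp only
  by_cases h : 0 < kn.2
  · rw [if_pos h, if_pos h]
    rw [PySem.List.foldl_congr_mem _ _
      (fun out attr => out ++ pvSelB (pvLastDict facts (pvCounts facts)) kn attr) acc
      ?_, PySem.List.foldl_append_eq_flatMap]
    intro acc2 attr hattr
    dsimp only
    unfold pvSelB
    split_ifs <;> simp
  · rw [if_neg h, if_neg h, List.append_nil]

-- the common per-attribute, per-element count
def pvMid (facts : List (String × String × String × Bool)) (x : String × String × String × Bool)
    (t : String × String × String) : Nat :=
  if t.2.2 == "one" then
    (if (pvLastDict facts (pvCounts facts)).get? (x.1, t.1) = some x then 1 else 0)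
  else (if x.2.1 == t.1 then (pvFilterByActive facts).count x else 0)

theorem pvLDhit (facts : List (String × String × String × Bool)) (e a : String)
    (x : String × String × String × Bool)
    (h : (pvLastDict facts (pvCounts facts)).get? (e, a) = some x) :
    x ∈ pvFilterByActive facts ∧ x.1 = e ∧ x.2.1 = a := by
  rw [← pvM2] at h
  have hmem := List.mem_of_getLast? h
  have hm := List.mem_filter.mp hmem
  have h2 := hm.2
  simp only [Bool.and_eq_true, beq_iff_eq] at h2
  exact ⟨hm.1, h2.1, h2.2⟩

theorem count_filter_ite {α : Type} [BEq α] [LawfulBEq α] (l : List α) (p : α → Bool) (a : α) :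
    (l.filter p).count a = if p a then l.count a else 0 := by
  by_cases h : p a = true
  · rw [List.count_filter h, if_pos h]
  · rw [if_neg h, List.count_eq_zero]
    intro hx
    exact h ((List.mem_filter.mp hx).2)

theorem pvMemNames (facts : List (String × String × String × Bool))
    (x : String × String × String × Bool) (hx : x ∈ pvFilterByActive facts) :
    x.1 ∈ pvGetNames (pvFilterByActive facts) := by
  rw [pvNames, PySem.Set.mem_ofList]
  exact List.mem_map.mpr ⟨x, hx, rfl⟩

theorem perAttrA (facts : List (String × String × String × Bool))
    (t : String × String × String) (x : String × String × String × Bool) :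
    ((pvGetNames (pvFilterByActive facts)).map (fun e => List.count x (pvSelA facts e t))).sum
      = pvMid facts x t := by
  have hnd : (pvGetNames (pvFilterByActive facts)).Nodup := by
    rw [pvNames]; exact PySem.Set.nodup_ofList _
  have hsel : ∀ e, List.count x (pvSelA facts e t) =
      if t.2.2 == "one" then
        (if (pvLastDict facts (pvCounts facts)).get? (e, t.1) = some x then 1 else 0)
      else (if x.2.1 == t.1 && x.1 == e then (pvFilterByActive facts).count x else 0) := by
    intro e
    unfold pvSelA pvFilterByAttribute pvFilterByEntity
    rw [List.filter_filter]
    have hcomm : (pvFilterByActive facts).filter (fun y => y.2.1 == t.1 && y.1 == e)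
        = (pvFilterByActive facts).filter (fun y => y.1 == e && y.2.1 == t.1) := by
      apply List.filter_congr
      intro y hy
      rw [Bool.and_comm]
    have hld : (pvLastDict facts (pvCounts facts)).get? (e, t.1)
        = ((pvFilterByActive facts).filter (fun y => y.2.1 == t.1 && y.1 == e)).getLast? := by
      rw [hcomm, pvM2]
    by_cases hone : (t.2.2 == "one") = true
    · rw [if_pos hone]
      by_cases hnil : (pvFilterByActive facts).filter (fun y => y.2.1 == t.1 && y.1 == e) = []
      · rw [hnil]
        simp only [List.length_nil, hone, Bool.true_and]
        rw [if_neg (by simp)]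
        rw [hld, hnil]
        simp
      · have hlen : 0 < ((pvFilterByActive facts).filter (fun y => y.2.1 == t.1 && y.1 == e)).length :=
          List.length_pos_iff.mpr hnil
        rw [if_pos (by simp [hone, hlen])]
        obtain ⟨v, hv⟩ := Option.isSome_iff_exists.mp (List.getLast?_isSome.mpr hnil)
        rw [pyGetNeg1, hv, hld, hv]
        by_cases hvx : v = x
        · rw [hvx, if_pos rfl]
          simp
        · rw [if_neg (by intro hh; exact hvx (Option.some.inj hh))]
          rw [List.count_eq_zero]
          intro hm
          rw [List.mem_singleton] at hm
          exact hvx hm.symm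
    · rw [if_neg hone, if_neg (by simp [hone]), count_filter_ite]
  rw [List.map_congr_left (fun e _ => hsel e)]
  unfold pvMid
  by_cases hone : (t.2.2 == "one") = true
  · simp only [hone, if_true]
    rw [sum_single _ _ x.1 hnd ?hzero]
    case hzero =>
      intro e he hne
      rw [if_neg]
      intro hhit
      exact hne ((pvLDhit facts e t.1 x hhit).2.1).symm
    by_cases hhit : (pvLastDict facts (pvCounts facts)).get? (x.1, t.1) = some x
    · rw [if_pos (pvMemNames facts x (pvLDhit facts x.1 t.1 x hhit).1)]
    · rw [if_neg hhit]
      by_cases hm : x.1 ∈ pvGetNames (pvFilterByActive facts)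
      · rw [if_pos hm]
      · rw [if_neg hm]
  · simp only [hone, if_false, Bool.false_eq_true]
    rw [sum_single _ _ x.1 hnd ?hzero]
    case hzero =>
      intro e he hne
      rw [if_neg (fun hcond => hne (by
        have h2 : (x.1 == e) = true := by
          have := hcond
          simp only [Bool.and_eq_true] at this
          exact this.2
        exact (beq_iff_eq.mp h2).symm))]
    by_cases hc : (pvFilterByActive facts).count x = 0
    · rw [hc]
      split_ifs <;> rfl
    · have hxm : x ∈ pvFilterByActive facts := by
        rw [← List.count_pos_iff]
        omega
      rw [if_pos (pvMemNames facts x hxm)]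
      by_cases ha : (x.2.1 == t.1) = true
      · rw [if_pos (by simp [ha]), if_pos ha]
      · rw [if_neg (by simp [ha]), if_neg ha]

theorem perAttrB (facts : List (String × String × String × Bool))
    (t : String × String × String) (x : String × String × String × Bool) :
    ((pvCounts facts).items.map (fun kn => if 0 < kn.2 then
        List.count x (pvSelB (pvLastDict facts (pvCounts facts)) kn t) else 0)).sum
      = pvMid facts x t := by
  rw [dict_sum_single (pvCounts facts) _ (pvKeyOf x) (pvCounts_nodup_keys facts) ?hzero]
  case hzero =>
    intro p hp hne
    dsimp only
    by_cases h : 0 < p.2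
    · rw [if_pos h, List.count_eq_zero]
      intro hm
      apply hne
      unfold pvSelB at hm
      have hx : x = (p.1.1, p.1.2.1, p.1.2.2, true) := by
        split_ifs at hm
        · rw [List.mem_singleton] at hm
          exact hm
        · exact absurd hm (List.not_mem_nil)
        · rw [PySem.List.pyRepeat_singleton] at hm
          exact List.eq_of_mem_replicate hm
        · exact absurd hm (List.not_mem_nil)
      rw [hx]
      rfl
    · rw [if_neg h]
  cases hg : (pvCounts facts).get? (pvKeyOf x) with
  | none =>
    have hn : (pvCounts facts).getD (pvKeyOf x) 0 = 0 :=
      PySem.Dict.getD_of_get?_eq_none _ _ hg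
    have hcnt : (pvFilterByActive facts).count x = 0 := by
      by_cases hact : x.2.2.2 = true
      · have hx2 : pvTup (pvKeyOf x) = x := by
          have h1 : x = (x.1, x.2.1, x.2.2.1, x.2.2.2) := rfl
          simp only [pvTup, pvKeyOf]
          rw [h1, hact]
        rw [← hx2, pvM1, hn]
        rfl
      · rw [List.count_eq_zero]
        intro hm
        have := pvActMem facts x hm
        simp only [pvActives, List.mem_filter] at this
        exact hact this.2
    have hld : ¬ ((pvLastDict facts (pvCounts facts)).get? (x.1, t.1) = some x) := by
      intro hhit
      have h1 := (pvLDhit facts x.1 t.1 x hhit).1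
      have := List.count_pos_iff.mpr h1
      omega
    dsimp only
    unfold pvMid
    split_ifs <;>
      first
        | rfl
        | (exact absurd (by assumption) hld)
        | (exact hcnt.symm)
  | some v =>
    have hn : (pvCounts facts).getD (pvKeyOf x) 0 = v :=
      PySem.Dict.getD_of_get?_eq_some _ 0 hg
    unfold pvSelB pvMid
    simp only [pvKeyOf]
    by_cases hact : x.2.2.2 = true
    · have hxt : (x.1, x.2.1, x.2.2.1, true) = x := by
        have h1 : x = (x.1, x.2.1, x.2.2.1, x.2.2.2) := rfl
        conv_rhs => rw [h1, hact]
      have hx2 : pvTup (pvKeyOf x) = x := by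
        simp only [pvTup, pvKeyOf]
        exact hxt
      have hcnt : (pvFilterByActive facts).count x = v.toNat := by
        have := pvM1 facts (pvKeyOf x)
        rw [hn, hx2] at this
        exact this
      rw [hxt]
      by_cases hone : (t.2.2 == "one") = true <;>
        by_cases hguard : (t.1 == x.2.1) = true <;>
          by_cases hvpos : 0 < v
      · -- one, attribute matches, v > 0
        have heq : x.2.1 = t.1 := (beq_iff_eq.mp hguard).symm
        by_cases hhit : (pvLastDict facts (pvCounts facts)).get? (x.1, t.1) = some x
        · have hhit' : (pvLastDict facts (pvCounts facts)).get? (x.1, x.2.1) = some x := by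
            rw [heq]; exact hhit
          simp [hone, hguard, hvpos, hhit, hhit']
        · have hmiss : (pvLastDict facts (pvCounts facts)).get? (x.1, x.2.1) ≠ some x := by
            rw [heq]; exact hhit
          simp [hone, hguard, hvpos, hhit, hmiss]
      · -- one, attribute matches, v ≤ 0
        have hnohit : ¬ ((pvLastDict facts (pvCounts facts)).get? (x.1, t.1) = some x) := by
          intro hhit
          have := List.count_pos_iff.mpr (pvLDhit facts x.1 t.1 x hhit).1
          omega
        simp [hone, hguard, hvpos, hnohit]
      · -- one, attribute differs, v > 0
        have hnohit : ¬ ((pvLastDict facts (pvCounts facts)).get? (x.1, t.1) = some x) := by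
          intro hhit
          exact hguard (beq_iff_eq.mpr ((pvLDhit facts x.1 t.1 x hhit).2.2).symm)
        simp [hone, hguard, hvpos, hnohit]
      · -- one, attribute differs, v ≤ 0
        have hnohit : ¬ ((pvLastDict facts (pvCounts facts)).get? (x.1, t.1) = some x) := by
          intro hhit
          exact hguard (beq_iff_eq.mpr ((pvLDhit facts x.1 t.1 x hhit).2.2).symm)
        simp [hone, hguard, hvpos, hnohit]
      · -- many, attribute matches, v > 0
        have heq : x.2.1 = t.1 := (beq_iff_eq.mp hguard).symm
        simp [hone, hguard, hvpos, heq, PySem.List.pyRepeat_singleton, List.count_replicate, hcnt]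
      · -- many, attribute matches, v ≤ 0
        have heq : x.2.1 = t.1 := (beq_iff_eq.mp hguard).symm
        simp [hone, hguard, hvpos, heq, hcnt]
        omega
      · -- many, attribute differs, v > 0
        have hne2 : (x.2.1 == t.1) = false := by
          simp only [beq_eq_false_iff_ne, ne_eq]
          intro hh
          exact hguard (beq_iff_eq.mpr hh.symm)
        simp [hone, hguard, hvpos, hne2]
      · -- many, attribute differs, v ≤ 0
        have hne2 : (x.2.1 == t.1) = false := by
          simp only [beq_eq_false_iff_ne, ne_eq]
          intro hh
          exact hguard (beq_iff_eq.mpr hh.symm)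
        simp [hone, hguard, hvpos, hne2]
    · -- x is not an assertion tuple: every count is 0 and so is pvMid
      have hne : ∀ L : List (String × String × String × Bool),
          (∀ y ∈ L, y = (x.1, x.2.1, x.2.2.1, true)) → List.count x L = 0 := by
        intro L hL
        rw [List.count_eq_zero]
        intro hm
        have := hL x hm
        apply hact
        have h4 := congrArg (fun z => z.2.2.2) this
        simpa using h4
      have hld : ¬ ((pvLastDict facts (pvCounts facts)).get? (x.1, t.1) = some x) := by
        intro hhit
        have h1 := pvActMem facts x (pvLDhit facts x.1 t.1 x hhit).1
        simp only [pvActives, List.mem_filter] at h1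
        exact hact h1.2
      have hcnt : (pvFilterByActive facts).count x = 0 := by
        rw [List.count_eq_zero]
        intro hm
        have h1 := pvActMem facts x hm
        simp only [pvActives, List.mem_filter] at h1
        exact hact h1.2
      split_ifs <;>
        first
          | rfl
          | (exact absurd (by assumption) hld)
          | (exact hcnt.symm)
          | (rw [hcnt]; apply hne; intro y hy;
             first
               | (rw [List.mem_singleton] at hy; exact hy)
               | (rw [PySem.List.pyRepeat_singleton] at hy; exact List.eq_of_mem_replicate hy)
               | (exact absurd hy (List.not_mem_nil)))
          | (apply hne; intro y hy;
             first
               | (rw [List.mem_singleton] at hy; exact hy)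
               | (rw [PySem.List.pyRepeat_singleton] at hy; exact List.eq_of_mem_replicate hy)
               | (exact absurd hy (List.not_mem_nil)))

-- ===== VERDICT (by name: the statement is the Claim_ definition above) =====
theorem filter_facts_spec : Claim_equal_filter_facts := by
  intro facts schema _
  unfold Spec_filter_facts
  rw [pvA_flat, pvB_flat]
  apply PySem.List.sorted_eq_sorted_of_perm _ _ pvKey pvKey_injective
  rw [List.perm_iff_count]
  intro x
  rw [count_flatMap, count_flatMap]
  have hmapA : (pvGetNames (pvFilterByActive facts)).map
      (fun e => List.count x (schema.flatMap (fun attr => pvSelA facts e attr)))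
      = (pvGetNames (pvFilterByActive facts)).map
      (fun e => (schema.map (fun attr => List.count x (pvSelA facts e attr))).sum) := by
    apply List.map_congr_left
    intro e he
    rw [count_flatMap]
  have hmapB : (pvCounts facts).items.map
      (fun kn => List.count x (if 0 < kn.2 then
        schema.flatMap (fun attr => pvSelB (pvLastDict facts (pvCounts facts)) kn attr) else []))
      = (pvCounts facts).items.map
      (fun kn => (schema.map (fun attr => if 0 < kn.2 then
        List.count x (pvSelB (pvLastDict facts (pvCounts facts)) kn attr) else 0)).sum) := by
    apply List.map_congr_left
    intro kn hkn
    by_cases h : 0 < kn.2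
    · rw [if_pos h, count_flatMap]
      congr 1
      apply List.map_congr_left
      intro attr ha
      rw [if_pos h]
    · rw [if_neg h]
      simp [h]
  rw [hmapA, hmapB,
    sum_swap_list (pvGetNames (pvFilterByActive facts)) schema
      (fun e attr => List.count x (pvSelA facts e attr)),
    sum_swap_list (pvCounts facts).items schema
      (fun kn attr => if 0 < kn.2 then
        List.count x (pvSelB (pvLastDict facts (pvCounts facts)) kn attr) else 0)]
  refine congrArg List.sum (List.map_congr_left ?_)
  intro t ht
  rw [perAttrA facts t x]
  exact (perAttrB facts t x).symm
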